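-- pv_equiv track=rewrite | github.com/tractatus1889/metaexamples | metaexamples/grammars.py | g3_is_valid
-- ===== SOURCE A (Python) =====
-- from typing import Callable, List, Sequence, Tuple
--
-- DEFAULT_MAX_LEN = 12
--
-- DEFAULT_MIN_LEN = 1
--
-- def _tokens_from_text(text: str) -> List[str]:
--     """Split a grammar document into symbol tokens."""
--     return text.strip().split()
--
-- def _is_valid_length(tokens: Sequence[str], min_len: int, max_len: int) -> bool:
--     return min_len <= len(tokens) <= max_len
--
-- def g3_is_valid(
--     text: str,
--     alphabet: Sequence[str],
--     min_len: int = DEFAULT_MIN_LEN,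
--     max_len: int = DEFAULT_MAX_LEN,
-- ) -> bool:
--     """
--     g3: palindrome language over the grammar alphabet with even symbol counts.
--     """
--     tokens = _tokens_from_text(text)
--     if not _is_valid_length(tokens, min_len, max_len):
--         return False
--     if any(t not in alphabet for t in tokens):
--         return False
--     if tokens != list(reversed(tokens)):
--         return False
--     for symbol in alphabet:
--         if tokens.count(symbol) % 2 != 0:
--             return False
--     return True
-- ===== SOURCE B (Python) =====
-- def g3_is_valid(text, alphabet, min_len=1, max_len=12):
--     """Two-pointer single pass: after the length guard, an even length is
--     required (a palindrome has all symbol counts even iff its length is even),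
--     and one pass over the first half checks membership (via a set) and the
--     palindrome pairing at once."""
--     tokens = text.strip().split()
--     n = len(tokens)
--     if not (min_len <= n <= max_len):
--         return False
--     if n % 2 != 0:
--         return False
--     allowed = set(alphabet)
--     return all(tokens[i] in allowed and tokens[i] == tokens[n - 1 - i]
--                for i in range(n // 2))
-- ===== Notes on version B (the rewrite author's own statement) =====
-- stated objective: alternative
-- what changed: Instead of three staged passes (membership scan, full-list reversal comparison, per-alphabet-symbol count loop), B requires an even length up front (a palindrome has all counts even iff its length is even) and then does one half-length two-pointer pass over a set-indexed alphabet checking membership and the palindrome pairing together.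
import Mathlib
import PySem

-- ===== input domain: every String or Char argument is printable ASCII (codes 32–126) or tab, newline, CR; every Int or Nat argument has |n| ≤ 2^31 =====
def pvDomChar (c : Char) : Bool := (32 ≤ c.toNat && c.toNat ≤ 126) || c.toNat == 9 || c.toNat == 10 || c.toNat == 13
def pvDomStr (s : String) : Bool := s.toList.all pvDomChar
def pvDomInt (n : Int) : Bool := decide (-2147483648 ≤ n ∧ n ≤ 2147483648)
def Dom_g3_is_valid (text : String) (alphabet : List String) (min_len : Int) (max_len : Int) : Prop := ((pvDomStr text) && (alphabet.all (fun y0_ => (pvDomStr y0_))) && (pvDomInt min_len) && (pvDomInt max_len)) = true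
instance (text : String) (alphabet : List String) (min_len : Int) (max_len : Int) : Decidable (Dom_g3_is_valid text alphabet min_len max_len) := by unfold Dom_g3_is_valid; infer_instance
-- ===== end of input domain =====

-- B replaces A's three staged passes (membership scan, reversal comparison,
-- per-alphabet-symbol count loop) by an even-length guard plus ONE two-pointer
-- pass over the first half checking set membership and the palindrome pairing
-- together (a palindrome has all counts even iff its length is even);
-- objective: alternative.

-- ===== PORT A =====
def g3_is_valid (text : String) (alphabet : List String) (min_len : Int) (max_len : Int) : Bool :=
  let tokens := PySem.Str.split₀ (PySem.Str.strip text)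
  if !(decide (min_len ≤ (tokens.length : Int)) && decide ((tokens.length : Int) ≤ max_len)) then false
  else if tokens.any (fun t => !(alphabet.contains t)) then false
  else if tokens != tokens.reverse then false
  else alphabet.all (fun symbol => tokens.count symbol % 2 == 0)

-- ===== PORT B =====
def g3_is_valid_alt (text : String) (alphabet : List String) (min_len : Int) (max_len : Int) : Bool :=
  let tokens := PySem.Str.split₀ (PySem.Str.strip text)
  let n := tokens.length
  if !(decide (min_len ≤ (n : Int)) && decide ((n : Int) ≤ max_len)) then false
  else if PySem.Int.mod (n : Int) 2 != 0 then false
  else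
    let allowed : PySem.Set String := PySem.Set.ofList alphabet
    (List.range (n / 2)).all (fun i =>
      PySem.Set.contains allowed (tokens.getD i "") &&
      (tokens.getD i "" == tokens.getD (n - 1 - i) ""))

-- ===== PRECONDITION & SPEC =====
def Spec_g3_is_valid (text : String) (alphabet : List String) (min_len : Int) (max_len : Int) (out : Bool) : Prop := out = g3_is_valid_alt text alphabet min_len max_len
instance (text : String) (alphabet : List String) (min_len : Int) (max_len : Int) (out : Bool) : Decidable (Spec_g3_is_valid text alphabet min_len max_len out) := by unfold Spec_g3_is_valid; infer_instance

-- ===== CLAIM (what is proved, stated in full; the proofs are below) =====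
def Claim_equal_g3_is_valid : Prop := ∀ (text : String) (alphabet : List String) (min_len : Int) (max_len : Int), Dom_g3_is_valid text alphabet min_len max_len → Spec_g3_is_valid text alphabet min_len max_len (g3_is_valid text alphabet min_len max_len)

-- ===== LEMMAS AND PROOFS =====

-- A palindrome has all its members' counts even iff its length is even.
theorem pal_counts_even_iff (l : List String) (hpal : List.Palindrome l) :
    (∀ s ∈ l, l.count s % 2 = 0) ↔ l.length % 2 = 0 := by
  induction hpal with
  | nil => simp
  | singleton x => simp
  | cons_concat x hp2 ih =>
      rename_i l
      have hlen : (x :: (l ++ [x])).length = l.length + 2 := by simp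
      have hcnt : ∀ s, (x :: (l ++ [x])).count s % 2 = l.count s % 2 := by
        intro s
        by_cases h : x = s <;>
          simp [List.count_append, h] <;> omega
      constructor
      · intro h
        rw [hlen]
        have : l.length % 2 = 0 := by
          rw [← ih]
          intro s hs
          have := h s (by simp [hs])
          rwa [hcnt] at this
        omega
      · intro h
        have hl : l.length % 2 = 0 := by rw [hlen] at h; omega
        intro s hs
        rw [hcnt]
        by_cases hmem : s ∈ l
        · exact (ih.mpr hl) s hmem
        · simp [List.count_eq_zero_of_not_mem hmem]

-- The two-pointer half pass succeeds iff every token is allowed and the list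
-- is its own reverse, given the length is even.
theorem half_pass_iff (tokens alphabet : List String) (heven : tokens.length % 2 = 0) :
    ((List.range (tokens.length / 2)).all (fun i =>
        PySem.Set.contains (PySem.Set.ofList alphabet) (tokens.getD i "") &&
        (tokens.getD i "" == tokens.getD (tokens.length - 1 - i) "")) = true)
    ↔ ((∀ t ∈ tokens, t ∈ alphabet) ∧ tokens = tokens.reverse) := by
  set n := tokens.length with hn
  have hkey : ∀ i, i < n → tokens.getD i "" ∈ tokens := by
    intro i hi
    rw [List.getD_eq_getElem _ _ (by omega)]
    exact List.getElem_mem (by omega)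
  have hrevD : ∀ i, i < n → tokens.reverse.getD i "" = tokens.getD (n - 1 - i) "" := by
    intro i hi
    rw [List.getD_eq_getElem _ _ (by simpa using hi),
        List.getD_eq_getElem _ _ (by omega), List.getElem_reverse]
  simp only [List.all_eq_true, List.mem_range, Bool.and_eq_true, beq_iff_eq,
    PySem.Set.contains_iff, PySem.Set.mem_ofList]
  constructor
  · intro h
    have hidx : ∀ i, i < n / 2 → n - 1 - (n - 1 - i) = i := by intro i hi; omega
    constructor
    · intro t ht
      obtain ⟨i, hi, hti⟩ := List.mem_iff_getElem.mp ht
      have htD : tokens.getD i "" = t := by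
        rw [List.getD_eq_getElem _ _ hi]; exact hti
      by_cases hlt : i < n / 2
      · rw [← htD]; exact (h i hlt).1
      · have hj : n - 1 - i < n / 2 := by omega
        obtain ⟨hmemj, heqj⟩ := h (n - 1 - i) hj
        rw [show n - 1 - (n - 1 - i) = i from by omega] at heqj
        rw [← htD, ← heqj]
        exact hmemj
    · apply List.ext_getElem (by simp)
      intro i hi hi'
      rw [List.getElem_reverse,
          ← List.getD_eq_getElem tokens "" (by omega),
          ← List.getD_eq_getElem tokens "" (by omega), ← hn]
      by_cases hlt : i < n / 2
      · exact (h i hlt).2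
      · by_cases hj : n - 1 - i < n / 2
        · have := (h (n - 1 - i) hj).2
          rw [show n - 1 - (n - 1 - i) = i from by omega] at this
          exact this.symm
        · have : i = n - 1 - i := by omega
          rw [← this]
  · rintro ⟨hmem, hpal⟩ i hi
    have h1 : i < n := by omega
    refine ⟨hmem _ (hkey i h1), ?_⟩
    conv_lhs => rw [hpal]
    exact hrevD i h1

-- The two bodies agree for any token list (instantiated with the split of the
-- input text in the verdict).
theorem core_eq (tokens alphabet : List String) (min_len max_len : Int) :
    (if !(decide (min_len ≤ (tokens.length : Int)) && decide ((tokens.length : Int) ≤ max_len)) then false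
     else if tokens.any (fun t => !(alphabet.contains t)) then false
     else if tokens != tokens.reverse then false
     else alphabet.all (fun symbol => tokens.count symbol % 2 == 0))
    =
    (if !(decide (min_len ≤ (tokens.length : Int)) && decide ((tokens.length : Int) ≤ max_len)) then false
     else if PySem.Int.mod (tokens.length : Int) 2 != 0 then false
     else (List.range (tokens.length / 2)).all (fun i =>
        PySem.Set.contains (PySem.Set.ofList alphabet) (tokens.getD i "") &&
        (tokens.getD i "" == tokens.getD (tokens.length - 1 - i) ""))) := by
  set n := tokens.length with hn
  by_cases hlen : !(decide (min_len ≤ (n : Int)) && decide ((n : Int) ≤ max_len))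
  · simp [hlen]
  · simp only [hlen, Bool.false_eq_true, if_false]
    have hsub : (tokens.any (fun t => !(alphabet.contains t)) = true) ↔
        ¬ (∀ t ∈ tokens, t ∈ alphabet) := by
      simp [List.any_eq_true]
    have hmod : PySem.Int.mod (n : Int) 2 = ((n % 2 : Nat) : Int) := by
      rw [PySem.Int.mod_eq_emod_of_pos (by norm_num)]
      push_cast; rfl
    by_cases heven : n % 2 = 0
    · -- even length: B runs the half pass
      have hB : (PySem.Int.mod (n : Int) 2 != 0) = false := by
        rw [hmod, heven]; rfl
      rw [hB]
      simp only [Bool.false_eq_true, if_false]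
      by_cases hsubh : ∀ t ∈ tokens, t ∈ alphabet
      · by_cases hpal : tokens = tokens.reverse
        · have hA1 : (tokens.any (fun t => !(alphabet.contains t))) = false := by
            rw [← Bool.not_eq_true]; rw [hsub]; simp only [not_not]; exact hsubh
          have hA2 : (tokens != tokens.reverse) = false := by simp [← hpal]
          rw [hA1, hA2]
          simp only [Bool.false_eq_true, if_false]
          have hall : alphabet.all (fun symbol => tokens.count symbol % 2 == 0) = true := by
            simp only [List.all_eq_true, beq_iff_eq]
            intro s _
            by_cases hm : s ∈ tokens
            · exact (pal_counts_even_iff tokens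
                (List.Palindrome.of_reverse_eq hpal.symm)).mpr heven s hm
            · simp [List.count_eq_zero_of_not_mem hm]
          rw [hall, eq_comm]
          exact (half_pass_iff tokens alphabet heven).mpr ⟨hsubh, hpal⟩
        · have hA1 : (tokens.any (fun t => !(alphabet.contains t))) = false := by
            rw [← Bool.not_eq_true]; rw [hsub]; simp only [not_not]; exact hsubh
          have hA2 : (tokens != tokens.reverse) = true := by simp [hpal]
          rw [hA1, hA2]
          simp only [Bool.false_eq_true, if_false, if_true]
          rw [eq_comm, ← Bool.not_eq_true]
          intro hc
          exact hpal ((half_pass_iff tokens alphabet heven).mp hc).2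
      · have hA1 : (tokens.any (fun t => !(alphabet.contains t))) = true := hsub.mpr hsubh
        rw [hA1]
        simp only [if_true]
        rw [eq_comm, ← Bool.not_eq_true]
        intro hc
        exact hsubh ((half_pass_iff tokens alphabet heven).mp hc).1
    · -- odd length: B returns false; A's count loop must fail (or earlier guard)
      have hone : n % 2 = 1 := by omega
      have hB : (PySem.Int.mod (n : Int) 2 != 0) = true := by
        rw [hmod, hone]; rfl
      rw [hB]
      simp only [if_true]
      split_ifs with h2 h3
      · rfl
      · rfl
      · -- tokens all in alphabet and palindrome, odd length ⇒ some count is odd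
        have hsubh : ∀ t ∈ tokens, t ∈ alphabet := by
          by_contra hc; exact absurd (hsub.mpr hc) (by simpa using h2)
        have hpal : tokens = tokens.reverse := by
          by_contra hc; exact absurd (by simpa using hc) (by simpa using h3)
        rw [← Bool.not_eq_true]
        simp only [List.all_eq_true, beq_iff_eq, not_forall]
        have hne : ¬ ∀ s ∈ tokens, tokens.count s % 2 = 0 := by
          intro hall
          exact heven ((pal_counts_even_iff tokens
            (List.Palindrome.of_reverse_eq hpal.symm)).mp hall)
        push_neg at hne
        obtain ⟨s, hs, hodd⟩ := hne
        exact ⟨s, hsubh s hs, hodd⟩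

-- ===== VERDICT (by name: the statement is the Claim_ definition above) =====
theorem g3_is_valid_spec : Claim_equal_g3_is_valid := by
  intro text alphabet min_len max_len _
  exact core_eq (PySem.Str.split₀ (PySem.Str.strip text)) alphabet min_len max_len
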